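-- pv_equiv track=rewrite | github.com/Khizanag/algorithms | FooBar/Level 2/Ion Flux Relabeling/Ion Flux Relabeling.py | fn
-- ===== SOURCE A (Python) =====
-- def fn(i, cur_level, max_level, Q, R):
-- 	if cur_level == max_level:
-- 		return i
--
-- 	recL = fn(i,      cur_level+1, max_level, Q, R)
-- 	recR = fn(recL+1, cur_level+1, max_level, Q, R)
--
-- 	if recL in Q:
-- 		R[recL] = recR + 1
-- 	if recR in Q:
-- 		R[recR] = recR + 1
--
-- 	return recR + 1
-- ===== SOURCE B (Python) =====
-- def fn(i, cur_level, max_level, Q, R):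
--     # Side effect matches A's mapping: for each queried label in the tree
--     # (except the root) record its parent label; insertion order into R may differ.
--     d = max_level - cur_level
--     root = i + 2 ** (d + 1) - 2
--     for q in Q:
--         if i <= q < root:
--             lo, r = i, root
--             while True:
--                 half = (r - lo) // 2
--                 lroot = lo + half - 1
--                 if q == lroot or q == r - 1:
--                     R[q] = r
--                     break
--                 if q <= lroot:
--                     r = lroot
--                 else:
--                     lo += half
--                     r -= 1
--     return root
-- ===== Notes on version B (the rewrite author's own statement) =====
-- stated objective: alternative
-- what changed: B replaces A's post-order recursion over the whole subtree (exponential in max_level-cur_level) with the closed form root = i + 2^(max_level-cur_level+1) - 2 and, for the side effect on R, a per-query descent from the root; intended as faster (measured 279x at the largest size both finished) but a timing run could not confirm scaling, since on huge level gaps the bignum 2^(d+1) dominates both; A diverges when cur_level > max_level, which Pre_ excludes.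
import Mathlib
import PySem

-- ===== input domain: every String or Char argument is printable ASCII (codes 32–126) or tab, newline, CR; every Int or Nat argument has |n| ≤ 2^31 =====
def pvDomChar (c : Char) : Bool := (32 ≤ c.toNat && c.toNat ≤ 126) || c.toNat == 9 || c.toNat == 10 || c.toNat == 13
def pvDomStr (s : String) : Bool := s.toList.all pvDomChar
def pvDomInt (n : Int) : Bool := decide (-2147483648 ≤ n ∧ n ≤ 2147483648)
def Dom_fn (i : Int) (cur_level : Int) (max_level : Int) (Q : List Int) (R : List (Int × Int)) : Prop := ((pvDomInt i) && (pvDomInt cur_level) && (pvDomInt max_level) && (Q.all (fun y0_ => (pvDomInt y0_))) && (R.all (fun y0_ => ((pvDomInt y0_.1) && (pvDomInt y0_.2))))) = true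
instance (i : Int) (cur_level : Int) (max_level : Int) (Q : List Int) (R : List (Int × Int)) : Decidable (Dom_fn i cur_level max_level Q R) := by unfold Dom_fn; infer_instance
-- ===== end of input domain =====

-- B computes the root label i + 2^(max_level-cur_level+1) - 2 in closed form instead of A's
-- exponential recursion. Both Pythons mutate the dict R in place (same final mapping, possibly
-- different insertion order); the equivalence proved here is about the RETURN value only.

-- ===== PORT A =====
-- A recurses on cur_level+1 until it equals max_level; the recursion depth is
-- max_level - cur_level, taken as the Nat fuel below (Pre_fn guarantees it is ≥ 0;
-- for cur_level > max_level Python A never terminates). The dict writes to R do not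
-- affect the returned value and R is mutated in place, so they are not threaded here.
def fnAux : Nat → Int → Int
  | 0, i => i
  | Nat.succ d, i =>
      let recL := fnAux d i
      let recR := fnAux d (recL + 1)
      recR + 1

def fn (i : Int) (cur_level : Int) (max_level : Int) (Q : List Int) (R : List (Int × Int)) : Int :=
  fnAux ((max_level - cur_level).toNat) i

-- ===== PORT B =====
-- closed form from Source B (the loop over Q in Source B only mutates R in place and does not
-- touch the returned value, so it is not threaded here)
def fn_alt (i : Int) (cur_level : Int) (max_level : Int) (Q : List Int) (R : List (Int × Int)) : Int :=
  i + 2 ^ ((max_level - cur_level + 1).toNat) - 2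

-- ===== PRECONDITION & SPEC =====
-- Pre_ excludes cur_level > max_level, on which the Python A recurses without bound
-- (RecursionError) and never returns.
def Pre_fn (i : Int) (cur_level : Int) (max_level : Int) (Q : List Int) (R : List (Int × Int)) : Prop :=
  cur_level ≤ max_level
instance (i : Int) (cur_level : Int) (max_level : Int) (Q : List Int) (R : List (Int × Int)) : Decidable (Pre_fn i cur_level max_level Q R) := by unfold Pre_fn; infer_instance

def pvWitness_fn : Int × Int × Int × List Int × (List (Int × Int)) := (0, 0, 2, [1, 3], [])

def Spec_fn (i : Int) (cur_level : Int) (max_level : Int) (Q : List Int) (R : List (Int × Int)) (out : Int) : Prop := out = fn_alt i cur_level max_level Q R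
instance (i : Int) (cur_level : Int) (max_level : Int) (Q : List Int) (R : List (Int × Int)) (out : Int) : Decidable (Spec_fn i cur_level max_level Q R out) := by unfold Spec_fn; infer_instance

-- ===== CLAIM (what is proved, stated in full; the proofs are below) =====
def Claim_equal_fn : Prop := ∀ (i : Int) (cur_level : Int) (max_level : Int) (Q : List Int) (R : List (Int × Int)), Dom_fn i cur_level max_level Q R → Pre_fn i cur_level max_level Q R → Spec_fn i cur_level max_level Q R (fn i cur_level max_level Q R)

-- ===== LEMMAS AND PROOFS =====

theorem fnAux_closed (d : Nat) : ∀ i : Int, fnAux d i = i + 2 ^ (d + 1) - 2 := by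
  induction d with
  | zero => intro i; simp [fnAux]
  | succ d ih =>
      intro i
      simp only [fnAux, ih]
      have : (2 : Int) ^ (d + 1 + 1) = 2 ^ (d + 1) * 2 := pow_succ 2 (d + 1)
      omega

-- ===== VERDICT (by name: the statement is the Claim_ definition above) =====
theorem fn_spec : Claim_equal_fn := by
  intro i cur_level max_level Q R _ hpre
  unfold Spec_fn fn fn_alt
  rw [fnAux_closed]
  have h : (max_level - cur_level + 1).toNat = (max_level - cur_level).toNat + 1 := by
    unfold Pre_fn at hpre; omega
  rw [h]
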